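-- pv_equiv track=rewrite | github.com/embydextrous/Interview | matrix/79-findLargestSquareSurroundedByX.py | createHMatrix
-- ===== SOURCE A (Python) =====
-- def createHMatrix(M, R, C):
--     H = [[0 for j in range(C)] for j in range(R)]
--     for i in range(R):
--         for j in range(C):
--             if M[i][j] == 'X':
--                 if j == 0:
--                     H[i][j] = 1
--                 else:
--                     H[i][j] = H[i][j-1] + 1
--     return H
-- ===== SOURCE B (Python) =====
-- def createHMatrix(M, R, C):
--     H = []
--     for i in range(R):
--         row = M[i][:C] if C > 0 else []
--         n = len(row)
--         hrow = []
--         j = 0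
--         while j < n:
--             k = j + 1
--             while k < n and row[k] == row[j]:
--                 k += 1
--             if row[j] == 'X':
--                 hrow.extend(range(1, k - j + 1))
--             else:
--                 hrow.extend([0] * (k - j))
--             j = k
--         H.append(hrow)
--     return H
-- ===== Notes on version B (the rewrite author's own statement) =====
-- stated objective: alternative
-- what changed: B fills each row by maximal runs of equal cells (emitting 1..L for an 'X' run and L zeros otherwise, found by run detection), instead of A's cell-by-cell H[i][j-1] recurrence over a preallocated zero matrix.
import Mathlib
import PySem

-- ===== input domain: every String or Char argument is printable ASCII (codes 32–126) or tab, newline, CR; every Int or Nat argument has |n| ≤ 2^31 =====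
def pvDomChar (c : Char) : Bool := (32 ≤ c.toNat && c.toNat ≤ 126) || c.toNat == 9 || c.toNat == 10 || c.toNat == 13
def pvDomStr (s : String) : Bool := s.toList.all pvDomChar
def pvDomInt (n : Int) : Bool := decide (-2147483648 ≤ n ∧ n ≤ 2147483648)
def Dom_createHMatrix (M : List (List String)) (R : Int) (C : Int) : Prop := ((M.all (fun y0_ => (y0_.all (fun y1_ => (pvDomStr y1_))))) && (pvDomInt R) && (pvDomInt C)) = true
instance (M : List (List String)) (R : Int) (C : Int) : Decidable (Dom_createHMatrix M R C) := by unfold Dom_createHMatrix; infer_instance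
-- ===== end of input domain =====

-- B fills each row by maximal runs of equal cells (1..L for an 'X' run, L zeros otherwise) instead of
-- A's cell-by-cell H[i][j-1] recurrence in a preallocated zero matrix; same cost, different decomposition.

-- ===== PORT A =====
-- M[i][j] is read with pyGet? (none = IndexError; those inputs are excluded by Pre_).
def pvCellA (M : List (List String)) (i j : Int) : String :=
  (PySem.List.pyGet? ((PySem.List.pyGet? M i).getD []) j).getD ""
-- H is R.toNat × C.toNat by construction and A only touches it at 0 ≤ i < R, 0 ≤ j < C,
-- so reading/writing H via toNat-indexed getD/set is exact for every execution A completes.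
def pvSetA (H : List (List Int)) (i j : Int) (v : Int) : List (List Int) :=
  H.set i.toNat ((H.getD i.toNat []).set j.toNat v)
def pvGetA (H : List (List Int)) (i j : Int) : Int :=
  (H.getD i.toNat []).getD j.toNat 0
def createHMatrix (M : List (List String)) (R : Int) (C : Int) : List (List Int) :=
  let H0 : List (List Int) :=
    (PySem.List.pyRange 0 R 1).map (fun _ => (PySem.List.pyRange 0 C 1).map (fun _ => (0 : Int)))
  (PySem.List.pyRange 0 R 1).foldl (fun H i =>
    (PySem.List.pyRange 0 C 1).foldl (fun H j =>
      if pvCellA M i j = "X" then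
        if j = 0 then pvSetA H i j 1
        else pvSetA H i j (pvGetA H i (j - 1) + 1)
      else H) H) H0

-- ===== PORT B =====
-- the run-detection while-loops of Source B: peel one maximal run of equal strings, emit its block, recurse
-- (fuel = list length is only a totality guard; it never runs out)
def pvRunsGo : Nat → List String → List Int
  | _, [] => []
  | 0, _ :: _ => []
  | fuel + 1, x :: rest =>
    (if x = "X" then (List.range ((rest.takeWhile (fun y => y == x)).length + 1)).map (fun t : Nat => (t : Int) + 1)
     else List.replicate ((rest.takeWhile (fun y => y == x)).length + 1) 0)
      ++ pvRunsGo fuel (rest.dropWhile (fun y => y == x))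
def pvRunsB (l : List String) : List Int := pvRunsGo l.length l

def createHMatrix_alt (M : List (List String)) (R : Int) (C : Int) : List (List Int) :=
  (PySem.List.pyRange 0 R 1).foldl (fun H i =>
    H ++ [pvRunsB (if 0 < C then PySem.List.slice ((PySem.List.pyGet? M i).getD []) none (some C) else [])]) []

-- ===== PRECONDITION & SPEC =====
-- Pre_ excludes exactly the inputs on which A raises IndexError: when 0 < C and 0 < R, A reads
-- M[i][j] for all 0 ≤ i < R, 0 ≤ j < C, so it needs R rows each with at least C cells (on part of
-- those excluded inputs — enough rows, some row shorter than C — B slices and returns the H-matrix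
-- of the cells that are present instead of raising).
def Pre_createHMatrix (M : List (List String)) (R : Int) (C : Int) : Prop :=
  0 < C → (R ≤ (M.length : Int) ∧ ∀ row ∈ M.take R.toNat, C ≤ (row.length : Int))
instance (M : List (List String)) (R : Int) (C : Int) : Decidable (Pre_createHMatrix M R C) := by
  unfold Pre_createHMatrix; infer_instance
def pvWitness_createHMatrix : List (List String) × Int × Int := ([["X", "O"], ["X", "X"]], 2, 2)

def Spec_createHMatrix (M : List (List String)) (R : Int) (C : Int) (out : List (List Int)) : Prop := out = createHMatrix_alt M R C
instance (M : List (List String)) (R : Int) (C : Int) (out : List (List Int)) : Decidable (Spec_createHMatrix M R C out) := by unfold Spec_createHMatrix; infer_instance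

-- ===== CLAIM (what is proved, stated in full; the proofs are below) =====
def Claim_equal_createHMatrix : Prop := ∀ (M : List (List String)) (R : Int) (C : Int), Dom_createHMatrix M R C → Pre_createHMatrix M R C → Spec_createHMatrix M R C (createHMatrix M R C)

-- ===== LEMMAS AND PROOFS =====

-- reference semantics of one row: the left-to-right recurrence with carry c
def pvRec (c : Int) : List String → List Int
  | [] => []
  | x :: rest => if x = "X" then (c + 1) :: pvRec (c + 1) rest else 0 :: pvRec 0 rest

def pvCarry (c : Int) (l : List String) : Int := l.foldl (fun c x => if x = "X" then c + 1 else 0) c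

theorem pvRec_length (c : Int) (l : List String) : (pvRec c l).length = l.length := by
  induction l generalizing c with
  | nil => rfl
  | cons x rest ih => simp only [pvRec]; split <;> simp [ih]

theorem pvRec_append_singleton (c : Int) (l : List String) (x : String) :
    pvRec c (l ++ [x]) = pvRec c l ++ [if x = "X" then pvCarry c l + 1 else 0] := by
  induction l generalizing c with
  | nil => simp only [List.nil_append, pvRec, pvCarry, List.foldl_nil]; split <;> rfl
  | cons y rest ih =>
    simp only [List.cons_append, pvRec, pvCarry, List.foldl_cons]
    by_cases hy : y = "X" <;> simp [hy, ih, pvCarry]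

theorem pvCarry_append_singleton (c : Int) (l : List String) (x : String) :
    pvCarry c (l ++ [x]) = if x = "X" then pvCarry c l + 1 else 0 := by
  simp [pvCarry, List.foldl_append]

theorem pvRec_getD_last (c : Int) (l : List String) (h : l ≠ []) :
    (pvRec c l).getD (l.length - 1) 0 = pvCarry c l := by
  induction l using List.reverseRecOn with
  | nil => simp at h
  | append_singleton l' x _ =>
    rw [pvRec_append_singleton, pvCarry_append_singleton]
    simp [List.getD_eq_getElem?_getD, pvRec_length]

theorem pvRec_head_irrel (c c' : Int) (l : List String) (h : l.head? ≠ some "X") :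
    pvRec c l = pvRec c' l := by
  cases l with
  | nil => rfl
  | cons y t =>
    have hy : y ≠ "X" := by simpa using h
    simp [pvRec, hy]

theorem pvRec_replicateX (k : Nat) (c : Int) (d : List String) (hd : d.head? ≠ some "X") :
    pvRec c (List.replicate k "X" ++ d)
      = (List.range k).map (fun t : Nat => c + 1 + (t : Int)) ++ pvRec 0 d := by
  induction k generalizing c with
  | zero => simpa using pvRec_head_irrel c 0 d hd
  | succ k ih =>
    rw [List.replicate_succ, List.cons_append]
    rw [show pvRec c ("X" :: (List.replicate k "X" ++ d))
        = (c + 1) :: pvRec (c + 1) (List.replicate k "X" ++ d) from by simp [pvRec]]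
    rw [ih (c + 1), List.range_succ_eq_map, List.map_cons, List.map_map, List.cons_append]
    have hmap : List.map (fun t : Nat => c + 1 + 1 + (t : Int)) (List.range k)
        = List.map ((fun t : Nat => c + 1 + (t : Int)) ∘ Nat.succ) (List.range k) := by
      apply List.map_congr_left
      intro t _
      simp only [Function.comp_apply]
      push_cast
      ring
    rw [hmap]
    simp

theorem pvRec_nonX (l : List String) (d : List String) (hne : l ≠ [])
    (h : ∀ y ∈ l, y ≠ "X") :
    pvRec 0 (l ++ d) = List.replicate l.length 0 ++ pvRec 0 d := by
  induction l with
  | nil => simp at hne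
  | cons y t ih =>
    have hy : y ≠ "X" := h y (by simp)
    cases t with
    | nil => simp [pvRec, hy]
    | cons z t' =>
      have hih := ih (by simp) (fun y hy => h y (by simp [hy]))
      simp only [List.cons_append, pvRec, if_neg hy] at hih ⊢
      rw [hih]
      simp [List.replicate_succ]

-- B computes pvRec 0
theorem pvRunsGo_eq (fuel : Nat) (l : List String) (h : l.length ≤ fuel) :
    pvRunsGo fuel l = pvRec 0 l := by
  induction fuel generalizing l with
  | zero =>
    cases l with
    | nil => rfl
    | cons x r => simp at h
  | succ fuel ih =>
    cases l with
    | nil => rfl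
    | cons x rest =>
      have hsplit : List.takeWhile (fun y => y == x) rest ++ List.dropWhile (fun y => y == x) rest = rest :=
        List.takeWhile_append_dropWhile
      have hlen : (List.dropWhile (fun y => y == x) rest).length ≤ fuel := by
        have := List.length_dropWhile_le (fun y => y == x) rest
        simp only [List.length_cons] at h; omega
      have hdhead : (List.dropWhile (fun y => y == x) rest).head? ≠ some x := by
        cases hnil : List.dropWhile (fun y => y == x) rest with
        | nil => simp
        | cons a b =>
          have hw : List.dropWhile (fun y => y == x) rest ≠ [] := by simp [hnil]
          have hhd := List.head_dropWhile_not (fun y => y == x) hw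
          simp only [hnil, List.head_cons] at hhd
          simp only [List.head?_cons, ne_eq, Option.some.injEq]
          intro hax
          rw [hax] at hhd
          simp at hhd
      have hrun : ∀ y ∈ List.takeWhile (fun y => y == x) rest, y = x := by
        intro y hy
        simpa using List.mem_takeWhile_imp hy
      simp only [pvRunsGo, ih _ hlen]
      by_cases hx : x = "X"
      · subst hx
        have hrepl : "X" :: List.takeWhile (fun y => y == "X") rest
            = List.replicate ((List.takeWhile (fun y => y == "X") rest).length + 1) "X" := by
          rw [List.replicate_succ]
          congr 1
          exact List.eq_replicate_of_mem hrun
        conv_rhs => rw [show ("X" :: rest : List String)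
          = ("X" :: List.takeWhile (fun y => y == "X") rest) ++ List.dropWhile (fun y => y == "X") rest by
            simp [hsplit]]
        rw [hrepl, pvRec_replicateX _ _ _ (by simpa using hdhead)]
        congr 1
        apply List.map_congr_left
        intro t _
        ring
      · have hall : ∀ y ∈ x :: List.takeWhile (fun y => y == x) rest, y ≠ "X" := by
          intro y hy
          rcases List.mem_cons.mp hy with h1 | h2
          · simpa [h1] using hx
          · rw [hrun y h2]; exact hx
        conv_rhs => rw [show (x :: rest : List String)
          = (x :: List.takeWhile (fun y => y == x) rest) ++ List.dropWhile (fun y => y == x) rest by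
            simp [hsplit]]
        rw [pvRec_nonX _ _ (by simp) hall]
        simp [hx]

-- A: the inner loop on one row, localized
def pvRowStep (mi : List String) (r : List Int) (j : Int) : List Int :=
  if (PySem.List.pyGet? mi j).getD "" = "X" then
    if j = 0 then r.set j.toNat 1 else r.set j.toNat (r.getD (j - 1).toNat 0 + 1)
  else r

theorem pvFoldl_set_row (f : List (List Int) → Int → List (List Int))
    (g : List Int → Int → List Int) (i : Nat)
    (hfg : ∀ H j, i < H.length → f H j = H.set i (g (H.getD i []) j))
    (js : List Int) (H : List (List Int)) (hi : i < H.length) :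
    js.foldl f H = H.set i (js.foldl g (H.getD i []) ) := by
  induction js generalizing H with
  | nil => simp [List.set_getElem_self, List.getD_eq_getElem?_getD, List.getElem?_eq_getElem hi]
  | cons j js ih =>
    simp only [List.foldl_cons]
    rw [hfg H j hi, ih _ (by simpa using hi), List.set_set]
    congr 1
    simp [List.getD_eq_getElem?_getD, List.getElem?_set_self (by simpa using hi)]

theorem pvInner_eq (mi : List String) (n : Nat) (hn : n ≤ mi.length) (m : Nat) (hm : m ≤ n) :
    (PySem.List.pyRange 0 (m : Int) 1).foldl (pvRowStep mi) (List.replicate n 0)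
      = pvRec 0 (mi.take m) ++ List.replicate (n - m) 0 := by
  induction m with
  | zero => simp [PySem.List.pyRange_one_eq_nil, pvRec]
  | succ m ih =>
    have hmn : m < n := hm
    have hml : m < mi.length := lt_of_lt_of_le hmn hn
    rw [show ((m + 1 : Nat) : Int) = (m : Int) + 1 by push_cast; ring,
        PySem.List.pyRange_one_succ_right (by positivity), List.foldl_append,
        ih (le_of_lt hmn)]
    simp only [List.foldl_cons, List.foldl_nil]
    have htake : mi.take (m + 1) = mi.take m ++ [mi[m]] := by
      rw [List.take_add_one]; simp [List.getElem?_eq_getElem hml]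
    have hlenpre : (pvRec 0 (mi.take m)).length = m := by
      rw [pvRec_length]; exact List.length_take_of_le (le_of_lt hml)
    have hget : (PySem.List.pyGet? mi (m : Int)).getD "" = mi[m] := by
      simp [PySem.List.pyGet?_natCast, List.getElem?_eq_getElem hml]
    rw [pvRowStep, hget, htake, pvRec_append_singleton]
    by_cases hx : mi[m] = "X"
    · rw [if_pos hx, if_pos hx]
      have hrep : List.replicate (n - m) (0 : Int) = 0 :: List.replicate (n - m - 1) 0 := by
        rw [← List.replicate_succ]; congr 1; omega
      have hset : ∀ v : Int,
          (pvRec 0 (mi.take m) ++ List.replicate (n - m) 0).set m v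
            = pvRec 0 (mi.take m) ++ v :: List.replicate (n - m - 1) 0 := by
        intro v
        rw [List.set_append, if_neg (by omega), hlenpre, Nat.sub_self, hrep]
        rfl
      have hv : (if ((m : Int)) = 0 then
            (pvRec 0 (mi.take m) ++ List.replicate (n - m) 0).set ((m : Int)).toNat 1
          else (pvRec 0 (mi.take m) ++ List.replicate (n - m) 0).set ((m : Int)).toNat
            ((pvRec 0 (mi.take m) ++ List.replicate (n - m) 0).getD (((m : Int)) - 1).toNat 0 + 1))
          = pvRec 0 (mi.take m) ++ (pvCarry 0 (mi.take m) + 1) :: List.replicate (n - m - 1) 0 := by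
        by_cases hm0 : m = 0
        · subst hm0
          have h1 := hset 1
          simp only [Nat.cast_zero, Int.toNat_zero] at h1 ⊢
          norm_num [h1, pvCarry, pvRec]
          rw [show List.replicate n (0 : Int) = 0 :: List.replicate (n - 1) 0 from by
            rw [← List.replicate_succ]; congr 1; omega]
          simp
        · rw [if_neg (by exact_mod_cast hm0), Int.toNat_natCast]
          have hgd : (pvRec 0 (mi.take m) ++ List.replicate (n - m) 0).getD (((m : Int)) - 1).toNat 0
              = pvCarry 0 (mi.take m) := by
            rw [show (((m : Int)) - 1).toNat = m - 1 by omega]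
            rw [List.getD_eq_getElem?_getD, List.getElem?_append_left (by omega),
                ← List.getD_eq_getElem?_getD]
            have := pvRec_getD_last 0 (mi.take m) (by
              intro hc; apply hm0
              have := congrArg List.length hc
              simpa [List.length_take_of_le (le_of_lt hml)] using this)
            rwa [List.length_take_of_le (le_of_lt hml)] at this
          rw [hgd, hset]
        -- close: both branches produced the prefix ++ carry+1 form
      rw [hv]
      have hnm : n - m - 1 = n - (m + 1) := by omega
      rw [hnm]
      simp
    · rw [if_neg hx, if_neg hx]
      have : List.replicate (n - m) (0 : Int) = 0 :: List.replicate (n - (m + 1)) 0 := by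
        rw [← List.replicate_succ]; congr 1; omega
      rw [this]
      simp

theorem pvRange_toNat (C : Int) : PySem.List.pyRange 0 C 1 = PySem.List.pyRange 0 ((C.toNat : Int)) 1 := by
  by_cases hC : 0 ≤ C
  · rw [Int.toNat_of_nonneg hC]
  · rw [PySem.List.pyRange_one_eq_nil (by omega), PySem.List.pyRange_one_eq_nil (by omega)]

theorem pvStepI_eq (M : List (List String)) (C : Int) (k : Nat)
    (H : List (List Int)) (hk : k < H.length) :
    (PySem.List.pyRange 0 C 1).foldl (fun H j =>
        if pvCellA M (k : Int) j = "X" then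
          if j = 0 then pvSetA H (k : Int) j 1
          else pvSetA H (k : Int) j (pvGetA H (k : Int) (j - 1) + 1)
        else H) H
      = H.set k ((PySem.List.pyRange 0 C 1).foldl
          (pvRowStep ((PySem.List.pyGet? M (k : Int)).getD [])) (H.getD k [])) := by
  apply pvFoldl_set_row _ _ k _ _ _ hk
  intro H j hkH
  simp only [pvCellA, pvSetA, pvGetA, pvRowStep, Int.toNat_natCast]
  have hid : H = H.set k (H.getD k []) := by
    rw [List.getD_eq_getElem?_getD, List.getElem?_eq_getElem hkH]
    exact (List.set_getElem_self hkH).symm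
  split_ifs <;> first | rfl | exact hid

theorem pvOuterInv (M : List (List String)) (C : Int) (Rn : Nat)
    (hrows : ∀ k, k < Rn → C.toNat ≤ ((PySem.List.pyGet? M (k : Int)).getD []).length)
    (m : Nat) (hm : m ≤ Rn) :
    (PySem.List.pyRange 0 (m : Int) 1).foldl (fun H i =>
        (PySem.List.pyRange 0 C 1).foldl (fun H j =>
          if pvCellA M i j = "X" then
            if j = 0 then pvSetA H i j 1
            else pvSetA H i j (pvGetA H i (j - 1) + 1)
          else H) H)
      (List.replicate Rn (List.replicate C.toNat 0))
      = (List.range m).map (fun k : Nat => pvRec 0 (((PySem.List.pyGet? M (k : Int)).getD []).take C.toNat))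
        ++ List.replicate (Rn - m) (List.replicate C.toNat 0) := by
  induction m with
  | zero => simp [PySem.List.pyRange_one_eq_nil]
  | succ m ih =>
    rw [show ((m + 1 : Nat) : Int) = (m : Int) + 1 by push_cast; ring,
        PySem.List.pyRange_one_succ_right (by positivity), List.foldl_append,
        ih (by omega)]
    simp only [List.foldl_cons, List.foldl_nil]
    have hmR : m < Rn := hm
    have hlen : ((List.range m).map (fun k : Nat => pvRec 0 (((PySem.List.pyGet? M (k : Int)).getD []).take C.toNat))
        ++ List.replicate (Rn - m) (List.replicate C.toNat 0)).length = Rn := by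
      simp; omega
    rw [pvStepI_eq M C m _ (by rw [hlen]; exact hmR)]
    have hgd : ((List.range m).map (fun k : Nat => pvRec 0 (((PySem.List.pyGet? M (k : Int)).getD []).take C.toNat))
        ++ List.replicate (Rn - m) (List.replicate C.toNat 0)).getD m []
        = List.replicate C.toNat 0 := by
      rw [List.getD_eq_getElem?_getD, List.getElem?_append_right (by simp),
          List.getElem?_replicate]
      simp only [List.length_map, List.length_range, Nat.sub_self]
      rw [if_pos (by omega)]
      rfl
    rw [hgd, pvRange_toNat C,
        pvInner_eq ((PySem.List.pyGet? M (m : Int)).getD []) C.toNat (hrows m hmR) C.toNat le_rfl]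
    rw [Nat.sub_self, List.replicate_zero, List.append_nil]
    rw [List.set_append, if_neg (by simp),
        show List.replicate (Rn - m) (List.replicate C.toNat (0 : Int))
          = List.replicate C.toNat 0 :: List.replicate (Rn - (m + 1)) (List.replicate C.toNat 0) from by
            rw [← List.replicate_succ]; congr 1; omega]
    simp [List.range_succ]

-- ===== VERDICT (by name: the statement is the Claim_ definition above) =====
theorem createHMatrix_spec : Claim_equal_createHMatrix := by
  intro M R C _ hpre
  unfold Spec_createHMatrix createHMatrix createHMatrix_alt
  have hzrow : (PySem.List.pyRange 0 C 1).map (fun _ => (0 : Int)) = List.replicate C.toNat 0 := by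
    rw [List.map_const']
    congr 1
    simp [PySem.List.length_pyRange_one]
  have hH0 : (PySem.List.pyRange 0 R 1).map
      (fun _ => (PySem.List.pyRange 0 C 1).map (fun _ => (0 : Int)))
      = List.replicate R.toNat (List.replicate C.toNat 0) := by
    rw [hzrow, List.map_const']
    congr 1
    simp [PySem.List.length_pyRange_one]
  have hrows : ∀ k, k < R.toNat → C.toNat ≤ ((PySem.List.pyGet? M (k : Int)).getD []).length := by
    intro k hk
    by_cases hC : 0 < C
    · obtain ⟨hR, hall⟩ := hpre hC
      have hkM : k < M.length := by omega
      have hget : (PySem.List.pyGet? M (k : Int)).getD [] = M[k] := by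
        simp [PySem.List.pyGet?_natCast, List.getElem?_eq_getElem hkM]
      rw [hget]
      have hmem : M[k] ∈ M.take R.toNat := by
        have : (M.take R.toNat)[k]'(by simp; omega) = M[k] := List.getElem_take
        exact this ▸ List.getElem_mem _
      have := hall _ hmem
      omega
    · omega
  rw [hH0, pvRange_toNat R, pvOuterInv M C R.toNat hrows R.toNat le_rfl,
      Nat.sub_self, List.replicate_zero, List.append_nil,
      PySem.List.foldl_append_singleton_eq_map, List.nil_append,
      PySem.List.pyRange_one, List.map_map]
  apply List.map_congr_left
  intro k hk
  simp only [Function.comp_apply, zero_add]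
  have hrow : (if 0 < C then
      PySem.List.slice ((PySem.List.pyGet? M (k : Int)).getD []) none (some C) else [])
      = ((PySem.List.pyGet? M (k : Int)).getD []).take C.toNat := by
    by_cases hC : 0 < C
    · rw [if_pos hC, PySem.List.slice_to _ (le_of_lt hC)]
    · rw [if_neg hC, show C.toNat = 0 by omega, List.take_zero]
  rw [hrow, pvRunsB, pvRunsGo_eq _ _ le_rfl]
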